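-- pv_equiv track=rewrite | github.com/Arsen1302/Code-copy-detector | TestData/solutions/problem_807_4_1.py | solution_807_4_1
-- ===== SOURCE A (Python) =====
-- from typing import List
--
-- def solution_807_4_1(n: int, rollMax: List[int]) -> int:
--     dp = {}
--     def solution_807_4_2(n,last,count):
--         if n == 0: return 1
--         if (n,last,count) in dp: return dp[(n,last,count)]
--         ans = 0
--         for i in range(6):
--             if last == i:
--                 if count == rollMax[i]: continue
--                 ans += solution_807_4_2(n-1,last,count + 1)
--             else:
--                 ans += solution_807_4_2(n-1,i,1)
--         dp[(n,last,count)] = ans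
--         return ans
--
--     return solution_807_4_2(n,None,0) % 1000000007
-- ===== SOURCE B (Python) =====
-- from typing import List
--
-- def solution_807_4_1(n: int, rollMax: List[int]) -> int:
--     # Bottom-up tabulation over remaining rolls instead of recursive memoization.
--     if n == 0:
--         return 1
--     # layer[i][k] = number of ways to make m more rolls when the last roll was
--     # face i and it has been repeated k+1 times in a row (m = current depth).
--     layer = [[1] * n for _ in range(6)]          # m = 0: one way (no rolls left)
--     for m in range(1, n):
--         tot1 = sum(layer[j][0] for j in range(6))
--         layer = [
--             [(layer[i][k + 1] if k + 1 != rollMax[i] else 0)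
--              + tot1 - layer[i][0]
--              for k in range(n - m)]
--             for i in range(6)
--         ]
--     return sum(layer[i][0] for i in range(6)) % 1000000007
-- ===== Notes on version B (the rewrite author's own statement) =====
-- stated objective: alternative
-- what changed: Replaces the top-down memoized recursion (inner function + dict cache keyed by (n,last,count)) with an iterative bottom-up tabulation: a 6-by-(remaining-run-length) table of suffix counts, rebuilt once per roll by list comprehensions, with no recursion and no memo dict.
import Mathlib
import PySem

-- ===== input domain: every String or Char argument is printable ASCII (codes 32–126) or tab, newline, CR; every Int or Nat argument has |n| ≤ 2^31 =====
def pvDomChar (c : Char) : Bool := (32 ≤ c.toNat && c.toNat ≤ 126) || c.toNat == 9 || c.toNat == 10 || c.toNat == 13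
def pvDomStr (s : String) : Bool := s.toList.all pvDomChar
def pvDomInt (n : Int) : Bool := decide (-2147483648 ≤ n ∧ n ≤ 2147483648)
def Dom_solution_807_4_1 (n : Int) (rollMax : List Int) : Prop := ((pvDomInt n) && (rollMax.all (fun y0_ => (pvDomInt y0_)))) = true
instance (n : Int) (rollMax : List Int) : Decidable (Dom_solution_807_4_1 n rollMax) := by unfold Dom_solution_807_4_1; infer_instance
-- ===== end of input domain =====

-- B replaces A's memoized top-down recursion by an iterative bottom-up layer table
-- over the remaining number of rolls (objective: alternative decomposition, not faster).


-- ===== PORT A =====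
-- Python's `for i in range(6)`
def pvFaces : List Int := PySem.List.pyRange 0 6

-- `rollMax[i]`: for every index actually reached inside Pre_ the index is in range,
-- so pyGetD's default is never read (Python raises there; Pre_ excludes it).
def pvRm (rollMax : List Int) (i : Int) : Int := PySem.List.pyGetD rollMax i 0

-- A's inner recursion `solution_807_4_2`, with the memo dict `dp` (a hash map, like Python's dict) threaded through.
-- The Nat fuel is the (nonnegative, by Pre_) first component `n` of the Python key.
mutual
def pvGoA (rollMax : List Int) (fuel : Nat) (last : Option Int) (count : Int)
    (dp : Std.HashMap (Nat × Option Int × Int) Int) :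
    Int × Std.HashMap (Nat × Option Int × Int) Int :=
  match fuel with
  | 0 => (1, dp)
  | m + 1 =>
    match dp[((m + 1 : Nat), last, count)]? with
    | some v => (v, dp)
    | none =>
      let r := pvLoopA rollMax m pvFaces last count 0 dp
      (r.1, r.2.insert (m + 1, last, count) r.1)
termination_by (fuel, 0)

def pvLoopA (rollMax : List Int) (m : Nat) (faces : List Int) (last : Option Int)
    (count : Int) (ans : Int) (dp : Std.HashMap (Nat × Option Int × Int) Int) :
    Int × Std.HashMap (Nat × Option Int × Int) Int :=
  match faces with
  | [] => (ans, dp)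
  | i :: rest =>
    if last == some i then
      if count == pvRm rollMax i then
        pvLoopA rollMax m rest last count ans dp
      else
        let r := pvGoA rollMax m last (count + 1) dp
        pvLoopA rollMax m rest last count (ans + r.1) r.2
    else
      let r := pvGoA rollMax m (some i) 1 dp
      pvLoopA rollMax m rest last count (ans + r.1) r.2
termination_by (m, faces.length + 1)
end

def solution_807_4_1 (n : Int) (rollMax : List Int) : Int :=
  PySem.Int.mod (pvGoA rollMax n.toNat none 0 ∅).1 1000000007

-- ===== PORT B =====
-- Source B: bottom-up tabulation; layer[i][k] = ways to make m more rolls given the last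
-- roll was face i, repeated k+1 times in a row.  All indexing is in range inside Pre_.
-- the body of Source B's `for m in range(1, n)` loop (one comprehension step)
def pvBody (rollMax : List Int) (n : Int) (layer : List (List Int)) (m : Int) :
    List (List Int) :=
  let tot1 := ((PySem.List.pyRange 0 6).map (fun j =>
    PySem.List.pyGetD (PySem.List.pyGetD layer j []) 0 0)).sum
  (PySem.List.pyRange 0 6).map (fun i =>
    (PySem.List.pyRange 0 (n - m)).map (fun k =>
      (if (k + 1) != PySem.List.pyGetD rollMax i 0 then
         PySem.List.pyGetD (PySem.List.pyGetD layer i []) (k + 1) 0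
       else 0)
      + tot1 - PySem.List.pyGetD (PySem.List.pyGetD layer i []) 0 0))

def solution_807_4_1_alt (n : Int) (rollMax : List Int) : Int :=
  if n == 0 then 1
  else
    let layer0 : List (List Int) :=
      (PySem.List.pyRange 0 6).map (fun _ => List.replicate n.toNat 1)
    let layer := (PySem.List.pyRange 1 n).foldl (pvBody rollMax n) layer0
    PySem.Int.mod (((PySem.List.pyRange 0 6).map (fun i =>
      PySem.List.pyGetD (PySem.List.pyGetD layer i []) 0 0)).sum) 1000000007

-- ===== PRECONDITION & SPEC =====
-- Pre_ excludes exactly the inputs where Python A raises: n < 0 (unbounded recursion,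
-- RecursionError) and n ≥ 2 with len(rollMax) < 6 (rollMax[i] raises IndexError).
def Pre_solution_807_4_1 (n : Int) (rollMax : List Int) : Prop :=
  0 ≤ n ∧ (n ≤ 1 ∨ 6 ≤ rollMax.length)
instance (n : Int) (rollMax : List Int) : Decidable (Pre_solution_807_4_1 n rollMax) := by
  unfold Pre_solution_807_4_1; infer_instance

def pvWitness_solution_807_4_1 : Int × List Int := (3, [2, 2, 2, 2, 2, 2])

def Spec_solution_807_4_1 (n : Int) (rollMax : List Int) (out : Int) : Prop := out = solution_807_4_1_alt n rollMax
instance (n : Int) (rollMax : List Int) (out : Int) : Decidable (Spec_solution_807_4_1 n rollMax out) := by unfold Spec_solution_807_4_1; infer_instance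

-- ===== CLAIM (what is proved, stated in full; the proofs are below) =====
def Claim_equal_solution_807_4_1 : Prop := ∀ (n : Int) (rollMax : List Int), Dom_solution_807_4_1 n rollMax → Pre_solution_807_4_1 n rollMax → Spec_solution_807_4_1 n rollMax (solution_807_4_1 n rollMax)

-- ===== LEMMAS AND PROOFS =====

-- The plain (memo-free) value computed by A's recursion: pvF fuel last count.
def pvF (rollMax : List Int) : Nat → Option Int → Int → Int
  | 0, _, _ => 1
  | m + 1, last, count =>
    (if last == some 0 then (if count == pvRm rollMax 0 then 0 else pvF rollMax m last (count + 1)) else pvF rollMax m (some 0) 1)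
    + ((if last == some 1 then (if count == pvRm rollMax 1 then 0 else pvF rollMax m last (count + 1)) else pvF rollMax m (some 1) 1)
    + ((if last == some 2 then (if count == pvRm rollMax 2 then 0 else pvF rollMax m last (count + 1)) else pvF rollMax m (some 2) 1)
    + ((if last == some 3 then (if count == pvRm rollMax 3 then 0 else pvF rollMax m last (count + 1)) else pvF rollMax m (some 3) 1)
    + ((if last == some 4 then (if count == pvRm rollMax 4 then 0 else pvF rollMax m last (count + 1)) else pvF rollMax m (some 4) 1)
    + ((if last == some 5 then (if count == pvRm rollMax 5 then 0 else pvF rollMax m last (count + 1)) else pvF rollMax m (some 5) 1)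
    + 0)))))

-- branch value of A's loop body for face i
def pvBr (rollMax : List Int) (m : Nat) (last : Option Int) (count : Int) (i : Int) : Int :=
  if last == some i then (if count == pvRm rollMax i then 0 else pvF rollMax m last (count + 1))
  else pvF rollMax m (some i) 1

theorem pvF_succ (rollMax : List Int) (m : Nat) (last : Option Int) (count : Int) :
    pvF rollMax (m + 1) last count = ((pvFaces.map (pvBr rollMax m last count)).sum) := by
  have h6 : pvFaces = [0, 1, 2, 3, 4, 5] := by decide
  rw [h6]
  simp only [List.map_cons, List.map_nil, List.sum_cons, List.sum_nil, pvBr, pvF]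

-- a memo dict is sound if every entry stores the memo-free value of its key
def pvSound (rollMax : List Int) (dp : Std.HashMap (Nat × Option Int × Int) Int) : Prop :=
  ∀ m last count v, dp[((m : Nat), last, count)]? = some v → v = pvF rollMax m last count

theorem pvGoA_spec (rollMax : List Int) (fuel : Nat) (last : Option Int) (count : Int)
    (dp : Std.HashMap (Nat × Option Int × Int) Int) (h : pvSound rollMax dp) :
    (pvGoA rollMax fuel last count dp).1 = pvF rollMax fuel last count ∧
      pvSound rollMax (pvGoA rollMax fuel last count dp).2 := by
  induction fuel generalizing last count dp with
  | zero => rw [pvGoA]; exact ⟨rfl, h⟩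
  | succ m ih =>
    have loop : ∀ (faces : List Int) (last' : Option Int) (count' ans : Int)
        (dp' : Std.HashMap (Nat × Option Int × Int) Int), pvSound rollMax dp' →
        (pvLoopA rollMax m faces last' count' ans dp').1
            = ans + (faces.map (pvBr rollMax m last' count')).sum ∧
          pvSound rollMax (pvLoopA rollMax m faces last' count' ans dp').2 := by
      intro faces
      induction faces with
      | nil => intro last' count' ans dp' h'; rw [pvLoopA]; simpa using h'
      | cons i rest ihf =>
        intro last' count' ans dp' h'
        rw [pvLoopA]
        by_cases hb : (last' == some i) = true
        · by_cases hc : (count' == pvRm rollMax i) = true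
          · have hrest := ihf last' count' ans dp' h'
            constructor
            · rw [if_pos hb, if_pos hc, hrest.1, List.map_cons, List.sum_cons]
              simp [pvBr, hb, hc]
            · rw [if_pos hb, if_pos hc]; exact hrest.2
          · have hr := ih last' (count' + 1) dp' h'
            have hrest := ihf last' count'
              (ans + (pvGoA rollMax m last' (count' + 1) dp').1)
              (pvGoA rollMax m last' (count' + 1) dp').2 hr.2
            constructor
            · rw [if_pos hb, if_neg hc, hrest.1, hr.1, List.map_cons, List.sum_cons]
              simp [pvBr, hb, hc, add_assoc]
            · rw [if_pos hb, if_neg hc]; exact hrest.2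
        · have hr := ih (some i) 1 dp' h'
          have hrest := ihf last' count'
            (ans + (pvGoA rollMax m (some i) 1 dp').1)
            (pvGoA rollMax m (some i) 1 dp').2 hr.2
          constructor
          · rw [if_neg hb, hrest.1, hr.1, List.map_cons, List.sum_cons]
            simp [pvBr, hb, add_assoc]
          · rw [if_neg hb]; exact hrest.2
    rw [pvGoA]
    cases hg : dp[((m + 1 : Nat), last, count)]? with
    | some v => exact ⟨h _ _ _ _ hg, h⟩
    | none =>
      have hl := loop pvFaces last count 0 dp h
      constructor
      · simpa [pvF_succ] using hl.1
      · intro m' l' c' v hv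
        rw [Std.HashMap.getElem?_insert] at hv
        split at hv
        · rename_i heq
          obtain ⟨h1, h2, h3⟩ : m' = m + 1 ∧ l' = last ∧ c' = count := by
            have := (beq_iff_eq ..).1 heq
            simp [Prod.ext_iff] at this
            tauto
          subst h1; subst h2; subst h3
          cases hv
          simpa [pvF_succ] using hl.1
        · exact hl.2 _ _ _ _ hv

-- the pure model of Source B's `layer` after the loop body has run for m = 1 … m
def pvModel (rollMax : List Int) (n : Int) (m : Nat) : List (List Int) :=
  (PySem.List.pyRange 0 6).map (fun i =>
    (PySem.List.pyRange 0 (n - m)).map (fun k => pvF rollMax m (some i) (k + 1)))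

-- reading one entry of a comprehension over range(w)
theorem pvEntry (g : Int → Int) (w t : Int) (h0 : 0 ≤ t) (h1 : t < w) :
    PySem.List.pyGetD ((PySem.List.pyRange 0 w).map g) t 0 = g t := by
  rw [show w = ((w.toNat : Nat) : Int) by omega, show t = ((t.toNat : Nat) : Int) by omega]
  exact PySem.List.pyGetD_map_pyRange g w.toNat t.toNat 0 (by omega)

-- reading one row of the model
theorem pvModel_row (rollMax : List Int) (n : Int) (m : Nat) (i : Int)
    (h0 : 0 ≤ i) (h6 : i < 6) :
    PySem.List.pyGetD (pvModel rollMax n m) i [] =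
      (PySem.List.pyRange 0 (n - m)).map (fun k => pvF rollMax m (some i) (k + 1)) := by
  unfold pvModel
  rw [show i = ((i.toNat : Nat) : Int) by omega]
  exact PySem.List.pyGetD_map_pyRange
    (fun i => (PySem.List.pyRange 0 (n - m)).map (fun k => pvF rollMax m (some i) (k + 1)))
    6 i.toNat [] (by omega)

-- one step of A's recurrence at a concrete face, written the way Source B computes it
theorem pvFkey (rollMax : List Int) (j : Nat) (i : Int) (h0 : 0 ≤ i) (h6 : i < 6) (c : Int) :
    pvF rollMax (j + 1) (some i) c
      = (if (c == pvRm rollMax i) = true then 0 else pvF rollMax j (some i) (c + 1))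
        + (((PySem.List.pyRange 0 6).map (fun i' => pvF rollMax j (some i') 1)).sum
           - pvF rollMax j (some i) 1) := by
  rw [show PySem.List.pyRange 0 6 = ([0, 1, 2, 3, 4, 5] : List Int) from by decide]
  interval_cases i <;>
    · simp only [pvF, List.map_cons, List.map_nil, List.sum_cons, List.sum_nil]
      simp
      all_goals split_ifs <;> ring

-- one pass of Source B's loop body advances the model by one level
theorem pvStep (rollMax : List Int) (n : Int) (j : Nat) (hj : (j : Int) + 2 ≤ n) :
    pvBody rollMax n (pvModel rollMax n j) ((j : Int) + 1) = pvModel rollMax n (j + 1) := by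
  unfold pvBody
  have htot : ((PySem.List.pyRange 0 6).map (fun j' =>
      PySem.List.pyGetD (PySem.List.pyGetD (pvModel rollMax n j) j' []) 0 0)).sum
      = ((PySem.List.pyRange 0 6).map (fun i' => pvF rollMax j (some i') 1)).sum := by
    refine congrArg List.sum (List.map_congr_left ?_)
    intro i' hi'
    obtain ⟨hi0, hi6⟩ := PySem.List.mem_pyRange_one.1 hi'
    rw [pvModel_row rollMax n j i' hi0 hi6, pvEntry _ _ _ le_rfl (by omega)]
    norm_num
  rw [htot]
  conv_rhs => rw [pvModel]
  refine List.map_congr_left ?_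
  intro i hi
  obtain ⟨hi0, hi6⟩ := PySem.List.mem_pyRange_one.1 hi
  have hcast : ((((j : Nat) + 1 : Nat)) : Int) = (j : Int) + 1 := by push_cast; ring
  rw [show (n - (((j + 1 : Nat) : Int))) = n - ((j : Int) + 1) by rw [hcast]]
  refine List.map_congr_left ?_
  intro k hk
  obtain ⟨hk0, hkw⟩ := PySem.List.mem_pyRange_one.1 hk
  rw [pvModel_row rollMax n j i hi0 hi6,
    pvEntry _ _ _ (by omega) (by omega),
    pvEntry _ _ _ le_rfl (by omega),
    pvFkey rollMax j i hi0 hi6 (k + 1)]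
  by_cases hc : ((k + 1 == pvRm rollMax i)) = true
  · have : pvRm rollMax i = PySem.List.pyGetD rollMax i 0 := rfl
    simp [bne, hc, ← this]
    try ring
  · have : pvRm rollMax i = PySem.List.pyGetD rollMax i 0 := rfl
    simp [bne, hc, ← this]
    try ring

-- folding Source B's loop from the initial table reaches the model
theorem pvFold (rollMax : List Int) (n : Int) (j : Nat) (hj : (j : Int) + 1 ≤ n) :
    (PySem.List.pyRange 1 ((j : Int) + 1)).foldl (pvBody rollMax n) (pvModel rollMax n 0)
      = pvModel rollMax n j := by
  induction j with
  | zero => rw [show PySem.List.pyRange 1 ((0 : Nat) + 1 : Int) = [] from by decide]; rfl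
  | succ j ih =>
    have h1 : ((j + 1 : Nat) : Int) + 1 = ((j : Int) + 1) + 1 := by push_cast; ring
    rw [h1, PySem.List.pyRange_one_succ_right (by omega), List.foldl_append,
      ih (by push_cast at hj ⊢; omega)]
    simpa using pvStep rollMax n j (by push_cast at hj ⊢; omega)

-- the initial table of Source B is the model at level 0
theorem pvLayer0 (rollMax : List Int) (n : Int) (h : 0 ≤ n) :
    (PySem.List.pyRange 0 6).map (fun _ => List.replicate n.toNat (1 : Int))
      = pvModel rollMax n 0 := by
  unfold pvModel
  refine List.map_congr_left ?_
  intro i _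
  symm
  rw [show n - ((0 : Nat) : Int) = ((n.toNat : Nat) : Int) by omega,
    PySem.List.pyRange_zero_natCast, List.map_map]
  rw [List.eq_replicate_iff]
  refine ⟨by simp, ?_⟩
  intro b hb
  simp only [List.mem_map, Function.comp] at hb
  obtain ⟨k, -, hk⟩ := hb
  simp [pvF] at hk
  omega

theorem pvAlt_eq (n : Int) (rollMax : List Int) (h : 0 ≤ n) :
    solution_807_4_1_alt n rollMax = PySem.Int.mod (pvF rollMax n.toNat none 0) 1000000007 := by
  by_cases hn0 : n = 0
  · subst hn0
    show (1 : Int) = PySem.Int.mod (pvF rollMax (Int.toNat 0) none 0) 1000000007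
    rw [show pvF rollMax (Int.toNat 0) none 0 = 1 from rfl]
    decide
  · have hn1 : 1 ≤ n := by omega
    rw [solution_807_4_1_alt, if_neg (by simpa using hn0)]
    simp only []
    have hn' : PySem.List.pyRange 1 n
        = PySem.List.pyRange 1 (((n.toNat - 1 : Nat) : Int) + 1) := by
      rw [show (((n.toNat - 1 : Nat) : Int) + 1) = n by omega]
    rw [pvLayer0 rollMax n h, hn', pvFold rollMax n (n.toNat - 1) (by omega)]
    have hsum : ((PySem.List.pyRange 0 6).map (fun i =>
        PySem.List.pyGetD (PySem.List.pyGetD (pvModel rollMax n (n.toNat - 1)) i []) 0 0)).sum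
        = ((PySem.List.pyRange 0 6).map
            (fun i => pvF rollMax (n.toNat - 1) (some i) 1)).sum := by
      refine congrArg List.sum (List.map_congr_left ?_)
      intro i hi
      obtain ⟨hi0, hi6⟩ := PySem.List.mem_pyRange_one.1 hi
      rw [pvModel_row rollMax n (n.toNat - 1) i hi0 hi6, pvEntry _ _ _ le_rfl (by omega)]
      norm_num
    rw [hsum]
    have hF : pvF rollMax n.toNat none 0
        = ((PySem.List.pyRange 0 6).map (fun i => pvF rollMax (n.toNat - 1) (some i) 1)).sum := by
      rw [show n.toNat = (n.toNat - 1) + 1 by omega, pvF_succ]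
      unfold pvFaces
      refine congrArg List.sum (List.map_congr_left ?_)
      intro i _
      simp [pvBr]
    rw [hF]

-- ===== VERDICT (by name: the statement is the Claim_ definition above) =====
theorem solution_807_4_1_spec : Claim_equal_solution_807_4_1 := by
  intro n rollMax _ hpre
  unfold Spec_solution_807_4_1
  rw [pvAlt_eq n rollMax hpre.1]
  unfold solution_807_4_1
  rw [(pvGoA_spec rollMax n.toNat none 0 ∅ (by
    intro m last count v hv; simp at hv)).1]
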